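-- pv_equiv track=rewrite | github.com/Xano-verse/ProjetosLEIC | Fundamentos da Programação/Projeto1/Projeto1.py | eh_territorio
-- ===== SOURCE A (Python) =====
-- def eh_territorio(territ):
--     #nunca são lançados erros pois a condição da len vem após
--     #a que verifica que é tuplo
--     if isinstance(territ, tuple) and len(territ) in range(1, 27):
--
--         #antes de comparar os comprimentos dos vários elementos
--         #tenho que verificar que TODOS os elementos são tuplos
--         for i in range(len(territ)):
--
--             if not isinstance(territ[i], tuple):
--                 return False
--
--         #loop a decrementar para evitar index out of range
--         for i in range(len(territ)-1, -1, -1):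
--
--             if len(territ[i]) != len(territ[i-1])\
--             or not len(territ[i]) in range(1,100):
--                 return False
--
--             for j in territ[i]:
--                 if (j != 0 and j != 1) or not isinstance(j, int):
--                     return False
--
--         #se não houver nenhum problema com o input
--         return True
--
--     #se territ nem for um tuplo
--     return False
-- ===== SOURCE B (Python) =====
-- def eh_territorio(territ):
--     # Single pass: collect the set of row lengths while checking values;
--     # afterwards require one single length in 1..99.
--     if not isinstance(territ, tuple) or not (1 <= len(territ) <= 26):
--         return False
--     lens = set()
--     for row in territ:
--         if not isinstance(row, tuple):
--             return False
--         lens.add(len(row))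
--         for v in row:
--             if (v != 0 and v != 1) or not isinstance(v, int):
--                 return False
--     return len(lens) == 1 and 1 <= max(lens) <= 99
-- ===== Notes on version B (the rewrite author's own statement) =====
-- stated objective: simpler
-- what changed: Replaces A's two index-driven passes and cyclic neighbour length comparison territ[i] vs territ[i-1] with one direct pass over the rows that accumulates the set of row lengths, followed by a singleton-and-range check on that set.
import Mathlib
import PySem

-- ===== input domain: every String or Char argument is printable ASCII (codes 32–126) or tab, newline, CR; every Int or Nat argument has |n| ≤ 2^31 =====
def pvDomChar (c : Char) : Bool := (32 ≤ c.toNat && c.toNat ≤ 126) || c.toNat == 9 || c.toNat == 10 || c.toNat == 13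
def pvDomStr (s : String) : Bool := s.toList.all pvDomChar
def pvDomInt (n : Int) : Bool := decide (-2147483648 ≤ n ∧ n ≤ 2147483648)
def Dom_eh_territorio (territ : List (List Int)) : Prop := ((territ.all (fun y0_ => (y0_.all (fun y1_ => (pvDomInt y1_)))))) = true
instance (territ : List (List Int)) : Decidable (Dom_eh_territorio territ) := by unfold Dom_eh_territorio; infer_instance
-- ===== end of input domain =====

-- B replaces A's index-driven descending pass with cyclic neighbour comparison territ[i] vs territ[i-1]
-- by one direct pass that accumulates the set of row lengths, then a singleton-in-1..99 check (objective: simpler).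

-- ===== PORT A =====
-- inner loop 'for j in territ[i]: if (j != 0 and j != 1) or not isinstance(j, int): return False'
-- (isinstance(j, int) is identically true at type Int)
def ehRowVals (row : List Int) : Bool :=
  row.all (fun j => !(decide (j ≠ 0) && decide (j ≠ 1)))

-- the descending loop 'for i in range(len(territ)-1, -1, -1)'; indices i and i-1 are always in
-- range (i ∈ 0..n-1, i-1 ∈ -1..n-2 with Python wrap for -1), so the total pyGetD form is exact
def ehLoopA (t : List (List Int)) : List Int → Bool
  | [] => true
  | i :: rest =>
    if (PySem.List.pyGetD t i []).length ≠ (PySem.List.pyGetD t (i - 1) []).length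
        ∨ ¬ (1 ≤ (PySem.List.pyGetD t i []).length ∧ (PySem.List.pyGetD t i []).length ≤ 99)
    then false
    else if ehRowVals (PySem.List.pyGetD t i []) then ehLoopA t rest else false

def eh_territorio (territ : List (List Int)) : Bool :=
  if 1 ≤ territ.length ∧ territ.length ≤ 26 then
    -- first pass 'isinstance(territ[i], tuple)' is identically true at type List (List Int)
    ehLoopA territ (PySem.List.pyRange ((territ.length : Int) - 1) (-1) (-1))
  else false

-- ===== PORT B =====
-- the single pass of Source B: check each row's values, accumulating the set of row lengths
def ehScanB : List (List Int) → PySem.Set Int → Option (PySem.Set Int)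
  | [], lens => some lens
  | row :: rest, lens =>
    let lens' := PySem.Set.add lens (PySem.List.len row)
    if row.all (fun v => !(decide (v ≠ 0) && decide (v ≠ 1))) then ehScanB rest lens' else none

def eh_territorio_alt (territ : List (List Int)) : Bool :=
  if ¬ (1 ≤ territ.length ∧ territ.length ≤ 26) then false
  else
    match ehScanB territ PySem.Set.empty with
    | none => false
    | some lens =>
      decide (lens.length = 1) &&
      (match PySem.List.max? lens (fun x => x) with
       | some m => decide (1 ≤ m ∧ m ≤ 99)
       | none => false)

-- ===== PRECONDITION & SPEC =====
def Spec_eh_territorio (territ : List (List Int)) (out : Bool) : Prop := out = eh_territorio_alt territ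
instance (territ : List (List Int)) (out : Bool) : Decidable (Spec_eh_territorio territ out) := by unfold Spec_eh_territorio; infer_instance

-- ===== CLAIM (what is proved, stated in full; the proofs are below) =====
def Claim_equal_eh_territorio : Prop := ∀ (territ : List (List Int)), Dom_eh_territorio territ → Spec_eh_territorio territ (eh_territorio territ)

-- ===== LEMMAS AND PROOFS =====

-- the per-index condition checked by A's descending loop
def ehCondA (t : List (List Int)) (i : Int) : Prop :=
  (PySem.List.pyGetD t i []).length = (PySem.List.pyGetD t (i - 1) []).length
  ∧ 1 ≤ (PySem.List.pyGetD t i []).length ∧ (PySem.List.pyGetD t i []).length ≤ 99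
  ∧ ehRowVals (PySem.List.pyGetD t i []) = true

theorem ehLoopA_iff (t : List (List Int)) (L : List Int) :
    ehLoopA t L = true ↔ ∀ i ∈ L, ehCondA t i := by
  induction L with
  | nil => simp [ehLoopA]
  | cons i rest ih =>
    simp only [ehLoopA, List.mem_cons]
    split_ifs with h1 h2
    · simp only [false_iff]
      intro h; have := h i (Or.inl rfl); unfold ehCondA at this; tauto
    · rw [ih]
      constructor
      · intro h j hj
        rcases hj with rfl | hj
        · unfold ehCondA; push Not at h1; tauto
        · exact h j hj
      · intro h j hj; exact h j (Or.inr hj)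
    · simp only [false_iff]
      intro h; have := h i (Or.inl rfl); unfold ehCondA at this; tauto

theorem ehScanB_eq (t : List (List Int)) (s : PySem.Set Int) :
    ehScanB t s =
      if t.all ehRowVals then some (PySem.Set.update s (t.map (fun r => PySem.List.len r))) else none := by
  induction t generalizing s with
  | nil => simp [ehScanB, PySem.Set.update]
  | cons r rest ih =>
    simp only [ehScanB, List.all_cons, List.map_cons]
    rw [ih]
    simp only [PySem.Set.update_cons]
    unfold ehRowVals
    split_ifs with h1 h2 h3 h4 <;> simp_all
    · rcases h3 with ⟨x, hx, y, hy, hy0, hy1⟩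
      rcases h2 x hx y hy with h | h <;> simp_all
    · rcases h2 with ⟨x, hx, y, hy, hy0, hy1⟩
      rcases h4 x hx y hy with h | h <;> simp_all
    · rename_i hA
      rcases h1 with ⟨x, hx, hx0, hx1⟩
      rcases hA.1 x hx with h | h <;> simp_all

theorem ofList_singleton_of_const {c : Int} (ls : List Int) (hne : ls ≠ [])
    (h : ∀ x ∈ ls, x = c) : PySem.Set.ofList ls = [c] := by
  have key : ∀ (m : List Int), (∀ x ∈ m, x = c) → PySem.Set.ofList m = [] ∨ PySem.Set.ofList m = [c] := by
    intro m hm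
    induction m with
    | nil => left; rfl
    | cons y ys ih =>
      right
      have hy : y = c := hm y (List.mem_cons_self)
      have hys : ∀ x ∈ ys, x = c := fun x hx => hm x (List.mem_cons_of_mem _ hx)
      rw [PySem.Set.ofList_cons, hy]
      have : PySem.Set.discard (PySem.Set.ofList ys) c = [] := by
        rw [List.eq_nil_iff_forall_not_mem]
        intro x hx
        rw [PySem.Set.mem_discard] at hx
        exact hx.2 (hys x ((PySem.Set.mem_ofList _ _).1 hx.1))
      rw [this]
  rcases key ls h with h0 | h1
  · exfalso
    rcases List.exists_mem_of_ne_nil ls hne with ⟨x, hx⟩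
    have : x ∈ PySem.Set.ofList ls := (PySem.Set.mem_ofList _ _).2 hx
    simp [h0] at this
  · exact h1

-- the common characterisation both programs compute
def ehGood (t : List (List Int)) : Prop :=
  (1 ≤ t.length ∧ t.length ≤ 26)
  ∧ (∀ row ∈ t, row.length = (t.headD []).length ∧ ehRowVals row = true)
  ∧ 1 ≤ (t.headD []).length ∧ (t.headD []).length ≤ 99

theorem ehA_true_iff (t : List (List Int)) : eh_territorio t = true ↔ ehGood t := by
  unfold eh_territorio ehGood
  by_cases hb : 1 ≤ t.length ∧ t.length ≤ 26
  swap
  · simp [hb]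
  rw [if_pos hb]
  have hne : t ≠ [] := by intro h; subst h; simp at hb
  simp only [hb, true_and]
  rw [ehLoopA_iff]
  constructor
  · intro h
    have hmem : ∀ (k : Nat), k < t.length → ehCondA t (k : Int) := by
      intro k hk
      apply h
      rw [PySem.List.mem_pyRange_neg_one]
      omega
    have hchain : ∀ (k : Nat), k < t.length → (t.getD k []).length = (t.getD 0 []).length := by
      intro k
      induction k with
      | zero => intro _; rfl
      | succ m ih =>
        intro hk
        have hc := hmem (m + 1) hk
        unfold ehCondA at hc
        have hcast : ((m + 1 : Nat) : Int) - 1 = (m : Int) := by push_cast; ring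
        rw [hcast] at hc
        simp only [PySem.List.pyGetD_natCast] at hc
        rw [hc.1]
        exact ih (by omega)
    have h0 := hmem 0 hb.1
    unfold ehCondA at h0
    simp only [PySem.List.pyGetD_natCast] at h0
    have hhead : t.headD [] = t.getD 0 [] := by
      cases t with
      | nil => rfl
      | cons x ts => rfl
    refine ⟨?_, ?_, ?_⟩
    · intro row hrow
      rcases List.mem_iff_getElem.1 hrow with ⟨k, hk, hget⟩
      have hvals := hmem k hk
      unfold ehCondA at hvals
      simp only [PySem.List.pyGetD_natCast] at hvals
      have hgd : t.getD k [] = row := by rw [List.getD_eq_getElem _ _ hk, hget]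
      constructor
      · rw [← hgd, hhead]; exact hchain k hk
      · rw [← hgd]; exact hvals.2.2.2
    · rw [hhead]; omega
    · rw [hhead]; omega
  · rintro ⟨hrows, hlo, hhi⟩
    intro i hi
    rw [PySem.List.mem_pyRange_neg_one] at hi
    have hi0 : 0 ≤ i := by omega
    have hin : i < (t.length : Int) := by omega
    unfold ehCondA
    have hrow : PySem.List.pyGetD t i [] = t[i.toNat]'(by omega) :=
      PySem.List.pyGetD_eq_getElem t [] hi0 (by exact_mod_cast hin)
    have hrmem : PySem.List.pyGetD t i [] ∈ t := by rw [hrow]; exact List.getElem_mem _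
    have hrlen := (hrows _ hrmem).1
    have hprev : (PySem.List.pyGetD t (i - 1) []).length = (t.headD []).length := by
      by_cases h0 : i = 0
      · subst h0
        rw [show (0:Int) - 1 = (-1:Int) from by norm_num]
        rw [PySem.List.pyGetD_neg_one _ _ hne]
        exact (hrows _ (List.getLast_mem hne)).1
      · have h1 : 0 ≤ i - 1 := by omega
        have h2 : i - 1 < (t.length : Int) := by omega
        have : PySem.List.pyGetD t (i - 1) [] = t[(i - 1).toNat]'(by omega) :=
          PySem.List.pyGetD_eq_getElem t [] h1 (by exact_mod_cast h2)
        rw [this]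
        exact (hrows _ (List.getElem_mem _)).1
    refine ⟨by rw [hrlen, hprev], by omega, by omega, (hrows _ hrmem).2⟩

theorem ehB_true_iff (t : List (List Int)) : eh_territorio_alt t = true ↔ ehGood t := by
  unfold eh_territorio_alt ehGood
  by_cases hb : 1 ≤ t.length ∧ t.length ≤ 26
  swap
  · simp [hb]
  rw [if_neg (not_not_intro hb)]
  have hne : t ≠ [] := by intro h; subst h; simp at hb
  simp only [hb, true_and]
  rw [ehScanB_eq]
  by_cases hv : t.all ehRowVals = true
  swap
  · rw [if_neg hv]
    simp only [List.all_eq_true] at hv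
    simp only [Bool.false_eq_true, false_iff]
    rintro ⟨hrows, -⟩
    exact hv (fun row hrow => (hrows row hrow).2)
  rw [if_pos hv]
  simp only [List.all_eq_true] at hv
  have hofl : PySem.Set.update PySem.Set.empty (t.map (fun r => PySem.List.len r))
      = PySem.Set.ofList (t.map (fun r => PySem.List.len r)) := rfl
  rw [hofl]
  obtain ⟨r0, ts, rfl⟩ : ∃ r0 ts, t = r0 :: ts := by
    cases t with
    | nil => exact absurd rfl hne
    | cons a b => exact ⟨a, b, rfl⟩
  simp only [PySem.List.len_eq, List.map_cons, List.headD_cons]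
  constructor
  · intro h
    rw [Bool.and_eq_true, decide_eq_true_iff] at h
    obtain ⟨h1, h2⟩ := h
    rcases List.length_eq_one_iff.1 h1 with ⟨d, hd⟩
    have hall : ∀ x ∈ ((r0.length : Int) :: ts.map (fun r => (r.length : Int))), x = d := by
      intro x hx
      have : x ∈ PySem.Set.ofList ((r0.length : Int) :: ts.map (fun r => (r.length : Int))) :=
        (PySem.Set.mem_ofList _ _).2 hx
      rw [hd] at this
      simpa using this
    have hd0 : (r0.length : Int) = d := hall _ (List.mem_cons_self)
    have hmax : PySem.List.max? [d] (fun x => x) = some d := by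
      rw [PySem.List.max?_id_cons]; rfl
    simp only [hd, hmax, decide_eq_true_iff] at h2
    refine ⟨?_, by omega, by omega⟩
    intro row hrow
    rcases List.mem_cons.1 hrow with rfl | hrow
    · exact ⟨rfl, hv _ List.mem_cons_self⟩
    · have : ((row.length : Int)) = d :=
        hall _ (List.mem_cons_of_mem _ (List.mem_map_of_mem hrow))
      exact ⟨by omega, hv _ (List.mem_cons_of_mem _ hrow)⟩
  · rintro ⟨hrows, hlo, hhi⟩
    have hconst : ∀ x ∈ ((r0.length : Int) :: ts.map (fun r => (r.length : Int))), x = (r0.length : Int) := by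
      intro x hx
      rcases List.mem_cons.1 hx with rfl | hx
      · rfl
      · rcases List.mem_map.1 hx with ⟨row, hrow, rfl⟩
        have := (hrows row (List.mem_cons_of_mem _ hrow)).1
        omega
    have hsingle := ofList_singleton_of_const _ (by simp) hconst
    simp only [hsingle, PySem.List.max?_id_cons, List.foldl_nil, List.length_singleton,
      Bool.and_eq_true, decide_eq_true_iff]
    refine ⟨trivial, by omega, by omega⟩

theorem pv_main (t : List (List Int)) : eh_territorio t = eh_territorio_alt t := by
  rw [Bool.eq_iff_iff, ehA_true_iff, ehB_true_iff]

-- ===== VERDICT (by name: the statement is the Claim_ definition above) =====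
theorem eh_territorio_spec : Claim_equal_eh_territorio := by
  intro territ _
  unfold Spec_eh_territorio
  exact pv_main territ
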